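-- pv_equiv track=rewrite | github.com/tungphambasement/TNN | torch/torch_pipeline_parallel_1f1b.py | compute_micro_sizes
-- ===== SOURCE A (Python) =====
-- from typing import List, Optional, Tuple
--
-- def compute_micro_sizes(batch_size: int, micro_bs: int) -> List[int]:
--     if micro_bs <= 0:
--         raise ValueError("micro_bs must be > 0")
--     out = []
--     remain = batch_size
--     while remain > 0:
--         cur = min(remain, micro_bs)
--         out.append(cur)
--         remain -= cur
--     return out
-- ===== SOURCE B (Python) =====
-- def compute_micro_sizes(batch_size: int, micro_bs: int) -> list:
--     if micro_bs <= 0: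
--         raise ValueError("micro_bs must be > 0")
--     if batch_size <= 0:
--         return []
--     full, rem = divmod(batch_size, micro_bs)
--     return [micro_bs] * full + ([rem] if rem else [])
-- ===== Notes on version B (the rewrite author's own statement) =====
-- stated objective: idiomatic
-- what changed: Replaced the repeated-subtraction while-loop with a closed-form divmod split: full chunks of micro_bs plus an optional remainder chunk.
import Mathlib
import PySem

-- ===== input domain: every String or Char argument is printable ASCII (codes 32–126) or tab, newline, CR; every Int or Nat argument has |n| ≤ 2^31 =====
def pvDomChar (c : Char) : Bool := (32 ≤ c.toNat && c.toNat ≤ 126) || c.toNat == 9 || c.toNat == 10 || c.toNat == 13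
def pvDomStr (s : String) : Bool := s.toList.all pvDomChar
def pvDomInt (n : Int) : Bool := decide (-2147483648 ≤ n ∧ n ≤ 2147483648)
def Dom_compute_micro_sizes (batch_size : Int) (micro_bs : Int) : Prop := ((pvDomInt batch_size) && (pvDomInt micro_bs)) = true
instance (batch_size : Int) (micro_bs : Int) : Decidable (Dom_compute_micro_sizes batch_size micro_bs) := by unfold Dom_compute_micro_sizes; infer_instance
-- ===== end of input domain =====

-- B replaces A's repeated-subtraction loop with a closed-form divmod split (idiomatic; same cost when the list is materialised).


-- ===== PORT A =====
-- A's while-loop: while remain > 0: cur = min(remain, micro_bs); out.append(cur); remain -= cur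
-- (terminates because micro_bs > 0 is carried as a hypothesis; A raises before the loop otherwise)
def pvLoopA (micro_bs : Int) (hp : 0 < micro_bs) (remain : Int) (out : List Int) : List Int :=
  if h : remain > 0 then
    pvLoopA micro_bs hp (remain - min remain micro_bs) (out ++ [min remain micro_bs])
  else out
  termination_by remain.toNat
  decreasing_by omega

def compute_micro_sizes (batch_size : Int) (micro_bs : Int) : List Int :=
  if h : micro_bs ≤ 0 then []   -- Python raises ValueError here; excluded by Pre_
  else pvLoopA micro_bs (by omega) batch_size []

-- ===== PORT B =====
def compute_micro_sizes_alt (batch_size : Int) (micro_bs : Int) : List Int :=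
  if micro_bs ≤ 0 then []       -- Python raises ValueError here; excluded by Pre_
  else if batch_size ≤ 0 then []
  else
    let full := PySem.Int.floordiv batch_size micro_bs
    let rem := PySem.Int.mod batch_size micro_bs
    List.replicate full.toNat micro_bs ++ (if rem ≠ 0 then [rem] else [])

-- ===== PRECONDITION & SPEC =====
-- Pre_ excludes exactly micro_bs ≤ 0, where Python A raises ValueError.
def Pre_compute_micro_sizes (batch_size : Int) (micro_bs : Int) : Prop := 0 < micro_bs
instance (batch_size : Int) (micro_bs : Int) : Decidable (Pre_compute_micro_sizes batch_size micro_bs) := by unfold Pre_compute_micro_sizes; infer_instance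
def pvWitness_compute_micro_sizes : Int × Int := (7, 3)

def Spec_compute_micro_sizes (batch_size : Int) (micro_bs : Int) (out : List Int) : Prop := out = compute_micro_sizes_alt batch_size micro_bs
instance (batch_size : Int) (micro_bs : Int) (out : List Int) : Decidable (Spec_compute_micro_sizes batch_size micro_bs out) := by unfold Spec_compute_micro_sizes; infer_instance

-- ===== CLAIM (what is proved, stated in full; the proofs are below) =====
def Claim_equal_compute_micro_sizes : Prop := ∀ (batch_size : Int) (micro_bs : Int), Dom_compute_micro_sizes batch_size micro_bs → Pre_compute_micro_sizes batch_size micro_bs → Spec_compute_micro_sizes batch_size micro_bs (compute_micro_sizes batch_size micro_bs)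

-- ===== LEMMAS AND PROOFS =====

-- B's closed form peels one full chunk: for r > m > 0, alt r m = m :: alt (r-m) m
lemma alt_peel (r m : Int) (hm : 0 < m) (hr : m < r) :
    compute_micro_sizes_alt r m = m :: compute_micro_sizes_alt (r - m) m := by
  have hm' : ¬ m ≤ 0 := by omega
  have hfd : PySem.Int.floordiv r m = r / m := PySem.Int.floordiv_eq_ediv_of_pos hm
  have hfd2 : PySem.Int.floordiv (r - m) m = (r - m) / m := PySem.Int.floordiv_eq_ediv_of_pos hm
  have hmd : PySem.Int.mod r m = r % m := PySem.Int.mod_eq_emod_of_pos hm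
  have hmd2 : PySem.Int.mod (r - m) m = (r - m) % m := PySem.Int.mod_eq_emod_of_pos hm
  have hdiv : (r - m) / m = r / m - 1 := by
    have := Int.add_mul_ediv_right r (-1) (by omega : m ≠ 0)
    simpa [sub_eq_add_neg, neg_mul] using this
  have hmod : (r - m) % m = r % m := Int.sub_emod_right r m
  have h1 : (1 : Int) ≤ PySem.Int.floordiv r m := by
    rw [PySem.Int.le_floordiv_iff_mul_le (by omega)]; omega
  have htn : (PySem.Int.floordiv r m).toNat = ((PySem.Int.floordiv (r - m) m).toNat) + 1 := by
    rw [hfd, hfd2, hdiv]; omega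
  simp only [compute_micro_sizes_alt, hm', if_false]
  rw [if_neg (by omega : ¬ r ≤ 0), if_neg (by omega : ¬ r - m ≤ 0)]
  simp only [htn, List.replicate_succ, hmd, hmd2, hmod]
  simp

-- the loop invariant: A's loop from state (r, out) produces out ++ (B's value on r)
lemma loop_eq (m : Int) (hp : 0 < m) :
    ∀ (n : Nat) (r : Int), r.toNat = n → ∀ out, pvLoopA m hp r out = out ++ compute_micro_sizes_alt r m := by
  intro n
  induction n using Nat.strong_induction_on with
  | _ n ih =>
    intro r hrn out
    rw [pvLoopA]
    by_cases hr : r > 0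
    · rw [dif_pos hr]
      by_cases hle : r ≤ m
      · -- last chunk: cur = r, next remain = 0
        have hmin : min r m = r := by omega
        rw [hmin]
        have : r - r = 0 := by omega
        rw [this, pvLoopA, dif_neg (by omega)]
        have hm' : ¬ m ≤ 0 := by omega
        simp only [compute_micro_sizes_alt, hm', if_false, if_neg (by omega : ¬ r ≤ 0)]
        by_cases heq : r = m
        · have hfd : PySem.Int.floordiv r m = 1 := by
            rw [PySem.Int.floordiv_eq_iff_of_pos hp]; omega
          have hmd : PySem.Int.mod r m = 0 := by
            have := PySem.Int.floordiv_mul_add_mod r m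
            rw [hfd] at this; omega
          subst heq
          simp [hfd, hmd]
        · have hfd : PySem.Int.floordiv r m = 0 := by
            rw [PySem.Int.floordiv_eq_iff_of_pos hp]; omega
          have hmd : PySem.Int.mod r m = r := by
            have := PySem.Int.floordiv_mul_add_mod r m
            rw [hfd] at this; omega
          simp [hfd, hmd]
          omega
      · -- full chunk: cur = m
        have hmin : min r m = m := by omega
        rw [hmin]
        have hdec : (r - m).toNat < n := by omega
        rw [ih (r - m).toNat (by omega) (r - m) rfl (out ++ [m])]
        rw [alt_peel r m hp (by omega)]
        simp
    · rw [dif_neg hr]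
      have hm' : ¬ m ≤ 0 := by omega
      simp [compute_micro_sizes_alt, hm', if_pos (by omega : r ≤ 0)]

-- ===== VERDICT (by name: the statement is the Claim_ definition above) =====
theorem compute_micro_sizes_spec : Claim_equal_compute_micro_sizes := by
  intro batch_size micro_bs _ hpre
  unfold Spec_compute_micro_sizes compute_micro_sizes
  have hm' : ¬ micro_bs ≤ 0 := by exact not_le.mpr hpre
  rw [dif_neg hm']
  simpa using loop_eq micro_bs (by omega) batch_size.toNat batch_size rfl []
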